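-- pv_equiv track=rewrite | github.com/whoissboy/Karpovrep | PZ13/pz13_1.py | sum_and_product_of_row
-- ===== SOURCE A (Python) =====
-- def sum_and_product_of_row(matrix, row_index):
--     if row_index < 0 or row_index >= len(matrix):
--         return None, None  # Если индекс строки вне диапазона
--
--     row = matrix[row_index]
--     row_sum = sum(row)
--     row_product = 1
--     for num in row:
--         row_product *= num
--
--     return row_sum, row_product
-- ===== SOURCE B (Python) =====
-- def sum_and_product_of_row(matrix, row_index):
--     if row_index < 0:
--         return None, None
--     return _locate(matrix, row_index)
--
-- def _locate(matrix, k):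
--     # walk the matrix recursively; running off the end means the index was out of range
--     if not matrix:
--         return None, None
--     if k == 0:
--         return _sum_prod(matrix[0])
--     return _locate(matrix[1:], k - 1)
--
-- def _sum_prod(row):
--     # fold the row back-to-front recursively
--     if not row:
--         return 0, 1
--     s, p = _sum_prod(row[1:])
--     return row[0] + s, row[0] * p
-- ===== Notes on version B (the rewrite author's own statement) =====
-- stated objective: alternative
-- what changed: Replaces A's len()-based bounds check, indexed access and iterative accumulation with structural recursion: the row is located by recursively peeling the matrix while decrementing the index (out-of-range discovered by running off the end), and sum/product are computed by a back-to-front recursive fold instead of loops.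
import Mathlib
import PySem

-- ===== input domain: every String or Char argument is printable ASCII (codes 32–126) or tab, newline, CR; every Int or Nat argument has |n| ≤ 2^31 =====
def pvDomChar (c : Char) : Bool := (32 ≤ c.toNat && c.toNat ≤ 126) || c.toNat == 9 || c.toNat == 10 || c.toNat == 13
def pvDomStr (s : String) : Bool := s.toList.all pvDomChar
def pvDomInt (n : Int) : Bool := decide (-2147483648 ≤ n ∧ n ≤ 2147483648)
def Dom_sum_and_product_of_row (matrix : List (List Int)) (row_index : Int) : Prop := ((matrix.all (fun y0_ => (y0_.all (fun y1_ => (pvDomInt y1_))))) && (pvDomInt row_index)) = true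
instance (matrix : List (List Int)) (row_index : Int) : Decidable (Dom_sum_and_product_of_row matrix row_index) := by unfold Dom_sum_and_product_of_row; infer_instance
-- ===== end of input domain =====

-- B replaces A's bounds check + indexed access + loops with structural recursion (peel the matrix to find the row, recursive back-to-front fold for sum and product); objective: alternative decomposition, same cost.

-- ===== PORT A =====
def sum_and_product_of_row (matrix : List (List Int)) (row_index : Int) : Option Int × Option Int :=
  if row_index < 0 ∨ row_index ≥ matrix.length then (none, none)
  else
    -- matrix[row_index]: the guard ensures the index is in range, so pyGet? is some
    let row := (PySem.List.pyGet? matrix row_index).getD []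
    let row_sum := row.foldl (fun acc num => acc + num) 0       -- sum(row)
    let row_product := row.foldl (fun acc num => acc * num) 1   -- for num in row: row_product *= num
    (some row_sum, some row_product)

-- ===== PORT B =====
-- _sum_prod: recursive back-to-front fold of the row
def pvSumProd (row : List Int) : Int × Int :=
  match row with
  | [] => (0, 1)
  | x :: xs =>
    let sp := pvSumProd xs
    (x + sp.1, x * sp.2)

-- _locate: peel the matrix while decrementing k; empty matrix = index out of range
def pvLocate (matrix : List (List Int)) (k : Int) : Option Int × Option Int :=
  match matrix with
  | [] => (none, none)
  | r :: rest =>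
    if k = 0 then
      let sp := pvSumProd r
      (some sp.1, some sp.2)
    else pvLocate rest (k - 1)

def sum_and_product_of_row_alt (matrix : List (List Int)) (row_index : Int) : Option Int × Option Int :=
  if row_index < 0 then (none, none)
  else pvLocate matrix row_index

-- ===== PRECONDITION & SPEC =====
def Spec_sum_and_product_of_row (matrix : List (List Int)) (row_index : Int) (out : Option Int × Option Int) : Prop := out = sum_and_product_of_row_alt matrix row_index
instance (matrix : List (List Int)) (row_index : Int) (out : Option Int × Option Int) : Decidable (Spec_sum_and_product_of_row matrix row_index out) := by unfold Spec_sum_and_product_of_row; infer_instance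

-- ===== CLAIM =====
def Claim_equal_sum_and_product_of_row : Prop := ∀ (matrix : List (List Int)) (row_index : Int), Dom_sum_and_product_of_row matrix row_index → Spec_sum_and_product_of_row matrix row_index (sum_and_product_of_row matrix row_index)

-- ===== LEMMAS AND PROOFS =====

theorem foldl_add_eq (row : List Int) (s : Int) :
    row.foldl (fun acc num => acc + num) s = s + (pvSumProd row).1 := by
  induction row generalizing s with
  | nil => simp [pvSumProd]
  | cons x xs ih => simp [List.foldl, pvSumProd, ih (s + x)]; ring

theorem foldl_mul_eq (row : List Int) (p : Int) :
    row.foldl (fun acc num => acc * num) p = p * (pvSumProd row).2 := by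
  induction row generalizing p with
  | nil => simp [pvSumProd]
  | cons x xs ih => simp [List.foldl, pvSumProd, ih (p * x)]; ring

-- A's value equals pvLocate on nonnegative indices
theorem locate_eq (matrix : List (List Int)) (k : Int) (hk : 0 ≤ k) :
    sum_and_product_of_row matrix k = pvLocate matrix k := by
  induction matrix generalizing k with
  | nil =>
    simp [sum_and_product_of_row, pvLocate]
  | cons r rest ih =>
    by_cases h0 : k = 0
    · subst h0
      simp [sum_and_product_of_row, pvLocate,
        foldl_add_eq r 0, foldl_mul_eq r 1]
    · have hk1 : 0 ≤ k - 1 := by omega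
      have hget : PySem.List.pyGet? (r :: rest) k = PySem.List.pyGet? rest (k - 1) := by
        obtain ⟨n, hn⟩ : ∃ n : Nat, (n : Int) = k - 1 := ⟨(k-1).toNat, by omega⟩
        have hk' : k = (n : Int) + 1 := by omega
        rw [hk', show (n : Int) + 1 - 1 = (n : Int) by ring]
        exact PySem.List.pyGet?_cons_succ r rest n
      have hstep : sum_and_product_of_row (r :: rest) k
          = sum_and_product_of_row rest (k - 1) := by
        unfold sum_and_product_of_row
        by_cases hout : (rest.length : Int) ≤ k - 1
        · have h1 : k < 0 ∨ ((r :: rest : List (List Int)).length : Int) ≤ k := by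
            simp; omega
          have h2 : k - 1 < 0 ∨ (rest.length : Int) ≤ k - 1 := Or.inr hout
          simp only [if_pos h1, if_pos h2]
        · have h1 : ¬ (k < 0 ∨ ((r :: rest : List (List Int)).length : Int) ≤ k) := by
            simp; omega
          have h2 : ¬ (k - 1 < 0 ∨ (rest.length : Int) ≤ k - 1) := by
            simp; omega
          simp only [if_neg h1, if_neg h2, hget]
      rw [hstep, ih (k - 1) hk1]
      simp [pvLocate, h0]

-- ===== VERDICT =====
theorem sum_and_product_of_row_spec : Claim_equal_sum_and_product_of_row := by
  intro matrix row_index _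
  unfold Spec_sum_and_product_of_row sum_and_product_of_row_alt
  by_cases hneg : row_index < 0
  · simp [sum_and_product_of_row, hneg]
  · simp [hneg, locate_eq matrix row_index (by omega)]
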